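-- pv_equiv track=rewrite | github.com/KoKoLates/ddrive-robot-notes | map/generator.py | square_path_generator
-- ===== SOURCE A (Python) =====
-- def square_path_generator(x: int, y: int, b: int, step: int) -> list[tuple[int, int]]:
--     """ Generator of square-shape waypoints
--     @param x: initial x
--     @param y: initial y
--     @param b: border of the square path
--     @param step: distance between each waypoint
--     """
--     waypoints = [
--         *((i, y) for i in range(x, x + b, step)),
--         *((x + b, j) for j in range(y, y + b, step)),
--         *((i, y + b) for i in range(x + b, x, -step)),
--         *((x, j) for j in range(y + b, y, -step)),
--     ]
--     return waypoints
-- ===== SOURCE B (Python) =====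
-- def square_path_generator(x: int, y: int, b: int, step: int) -> list[tuple[int, int]]:
--     """One flat loop over a single perimeter index, decoded with divmod into
--     (edge, offset), instead of four staged range comprehensions."""
--     n = len(range(0, b, step))
--     pts = []
--     for k in range(4 * n):
--         e, i = divmod(k, n)
--         o = i * step
--         if e == 0:
--             pts.append((x + o, y))
--         elif e == 1:
--             pts.append((x + b, y + o))
--         elif e == 2:
--             pts.append((x + b - o, y + b))
--         else:
--             pts.append((x, y + b - o))
--     return pts
-- ===== Notes on version B (the rewrite author's own statement) =====
-- stated objective: alternative
-- what changed: Replaces A's four staged range comprehensions by a single flat loop over one perimeter index k in range(4*n) that is decoded with divmod(k, n) into an edge number and an offset, from which the point is computed arithmetically.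
import Mathlib
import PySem

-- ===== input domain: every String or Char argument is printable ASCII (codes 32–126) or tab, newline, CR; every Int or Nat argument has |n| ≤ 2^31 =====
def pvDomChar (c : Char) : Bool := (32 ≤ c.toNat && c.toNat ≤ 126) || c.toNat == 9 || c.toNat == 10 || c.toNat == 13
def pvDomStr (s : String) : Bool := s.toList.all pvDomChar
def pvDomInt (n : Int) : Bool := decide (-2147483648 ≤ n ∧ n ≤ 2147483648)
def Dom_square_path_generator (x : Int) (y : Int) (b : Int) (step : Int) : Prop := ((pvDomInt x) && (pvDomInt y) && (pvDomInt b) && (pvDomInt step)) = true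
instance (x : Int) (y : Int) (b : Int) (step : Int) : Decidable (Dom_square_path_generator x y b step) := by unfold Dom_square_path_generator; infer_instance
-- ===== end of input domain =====

-- B replaces A's four staged range comprehensions by one flat loop over a single perimeter
-- index decoded with divmod into (edge, offset) (objective: alternative decomposition).

-- ===== PORT A =====
-- four comprehensions over distinct ranges, concatenated in order
def square_path_generator (x : Int) (y : Int) (b : Int) (step : Int) : List (Int × Int) :=
  ((PySem.List.pyRange x (x + b) step).map (fun i => (i, y)))
  ++ ((PySem.List.pyRange y (y + b) step).map (fun j => (x + b, j)))
  ++ ((PySem.List.pyRange (x + b) x (-step)).map (fun i => (i, y + b)))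
  ++ ((PySem.List.pyRange (y + b) y (-step)).map (fun j => (x, j)))

-- ===== PORT B =====
-- n = len(range(0, b, step)); one flat loop over k in range(4*n), decoding k with divmod
def square_path_generator_alt (x : Int) (y : Int) (b : Int) (step : Int) : List (Int × Int) :=
  let n : Int := (PySem.List.pyRange 0 b step).length
  (PySem.List.pyRange 0 (4 * n) 1).foldl (fun pts k =>
    let e := PySem.Int.floordiv k n
    let i := PySem.Int.mod k n
    let o := i * step
    pts ++ [if e = 0 then (x + o, y)
            else if e = 1 then (x + b, y + o)
            else if e = 2 then (x + b - o, y + b)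
            else (x, y + b - o)]) []

-- ===== PRECONDITION & SPEC =====
-- Pre_ excludes only step = 0, where Python's range raises ValueError in both A and B.
def Pre_square_path_generator (x : Int) (y : Int) (b : Int) (step : Int) : Prop := step ≠ 0
instance (x : Int) (y : Int) (b : Int) (step : Int) : Decidable (Pre_square_path_generator x y b step) := by unfold Pre_square_path_generator; infer_instance
def pvWitness_square_path_generator : Int × Int × Int × Int := (0, 0, 4, 1)
def Spec_square_path_generator (x : Int) (y : Int) (b : Int) (step : Int) (out : List (Int × Int)) : Prop := out = square_path_generator_alt x y b step
instance (x : Int) (y : Int) (b : Int) (step : Int) (out : List (Int × Int)) : Decidable (Spec_square_path_generator x y b step out) := by unfold Spec_square_path_generator; infer_instance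

-- ===== CLAIM (what is proved, stated in full; the proofs are below) =====
def Claim_equal_square_path_generator : Prop := ∀ (x : Int) (y : Int) (b : Int) (step : Int), Dom_square_path_generator x y b step → Pre_square_path_generator x y b step → Spec_square_path_generator x y b step (square_path_generator x y b step)

-- ===== LEMMAS AND PROOFS =====

-- the shared count: every one of A's four ranges has the length of range(0, b, step)
theorem pyRange_zero_spec (b s : Int) :
    PySem.List.pyRange 0 b s
      = (List.range ((PySem.List.pyRange 0 b s).length)).map (fun (k : Nat) => s * (k : Int)) := by
  unfold PySem.List.pyRange
  split_ifs <;> simp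

-- shifted range: range(x, x+c, s) is range(0, c, s) translated by x
theorem pyRange_shift (x c s : Int) :
    PySem.List.pyRange x (x + c) s = (PySem.List.pyRange 0 c s).map (fun o => x + o) := by
  unfold PySem.List.pyRange
  rcases lt_trichotomy s 0 with hs | hs | hs
  · have h1 : x + c < x ↔ c < 0 := by omega
    have e1 : x - (x + c) = 0 - c := by ring
    simp only [if_neg (by omega : ¬ s = 0), if_neg (by omega : ¬ 0 < s), h1, e1,
      List.map_map]
    exact List.map_congr_left fun k _ => by rw [Function.comp_apply]; ring
  · simp [hs]
  · have h1 : x < x + c ↔ 0 < c := by omega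
    have e1 : x + c - x = c - 0 := by ring
    simp only [if_neg (by omega : ¬ s = 0), if_pos hs, h1, e1, List.map_map]
    exact List.map_congr_left fun k _ => by rw [Function.comp_apply]; ring

-- descending edge: range(a, a-c, -s) is range(0, c, s) subtracted from a
theorem pyRange_down (a c s : Int) :
    PySem.List.pyRange a (a - c) (-s) = (PySem.List.pyRange 0 c s).map (fun o => a - o) := by
  unfold PySem.List.pyRange
  rcases lt_trichotomy s 0 with hs | hs | hs
  · have h1 : a < a - c ↔ c < 0 := by omega
    have e1 : a - c - a = 0 - c := by ring
    simp only [if_neg (by omega : ¬ (-s) = 0), if_neg (by omega : ¬ s = 0),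
      if_pos (by omega : 0 < -s), if_neg (by omega : ¬ 0 < s), h1, e1, List.map_map]
    exact List.map_congr_left fun k _ => by rw [Function.comp_apply]; ring
  · simp [hs]
  · have h1 : a - c < a ↔ 0 < c := by omega
    have e1 : a - (a - c) = c - 0 := by ring
    have e2 : -(-s) = s := neg_neg s
    simp only [if_neg (by omega : ¬ (-s) = 0), if_neg (by omega : ¬ s = 0),
      if_neg (by omega : ¬ 0 < -s), if_pos hs, h1, e1, e2, List.map_map]
    exact List.map_congr_left fun k _ => by rw [Function.comp_apply]; ring

-- divmod decode: floordiv/mod of j*n + i by n recover j and i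
theorem divmod_decode (n : Int) (hn : 0 < n) (j i : Int) (h0 : 0 ≤ i) (h1 : i < n) :
    PySem.Int.floordiv (j * n + i) n = j ∧ PySem.Int.mod (j * n + i) n = i := by
  rw [PySem.Int.floordiv_eq_ediv_of_pos hn, PySem.Int.mod_eq_emod_of_pos hn]
  constructor
  · rw [show j * n + i = i + n * j by ring, Int.add_mul_ediv_left _ _ (by omega : n ≠ 0),
      Int.ediv_eq_zero_of_lt h0 h1, zero_add]
  · rw [show j * n + i = i + n * j by ring, Int.add_mul_emod_self_left,
      Int.emod_eq_of_lt h0 h1]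

-- ===== VERDICT (by name: the statement is the Claim_ definition above) =====
theorem square_path_generator_spec : Claim_equal_square_path_generator := by
  intro x y b step _ hstep
  unfold Spec_square_path_generator square_path_generator square_path_generator_alt
  set n : Nat := (PySem.List.pyRange 0 b step).length with hn
  -- B is a map over range (4*n)
  have hB : (PySem.List.pyRange 0 (4 * (n : Int)) 1).foldl (fun pts k =>
      pts ++ [if PySem.Int.floordiv k n = 0 then (x + PySem.Int.mod k n * step, y)
              else if PySem.Int.floordiv k n = 1 then (x + b, y + PySem.Int.mod k n * step)
              else if PySem.Int.floordiv k n = 2 then (x + b - PySem.Int.mod k n * step, y + b)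
              else (x, y + b - PySem.Int.mod k n * step)]) []
      = (List.range (4 * n)).map (fun (k : Nat) =>
          (if PySem.Int.floordiv (k : Int) n = 0 then (x + PySem.Int.mod (k : Int) n * step, y)
           else if PySem.Int.floordiv (k : Int) n = 1 then (x + b, y + PySem.Int.mod (k : Int) n * step)
           else if PySem.Int.floordiv (k : Int) n = 2 then (x + b - PySem.Int.mod (k : Int) n * step, y + b)
           else (x, y + b - PySem.Int.mod (k : Int) n * step))) := by
    rw [PySem.List.foldl_append_singleton_eq_map, PySem.List.pyRange_one]
    rw [show ((4 * (n : Int)) - 0).toNat = 4 * n by omega]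
    rw [List.map_map]
    exact List.map_congr_left fun k _ => by simp
  simp only []
  rw [hB]
  -- A is four maps over range n
  have hA0 := pyRange_zero_spec b step
  have h1 : PySem.List.pyRange x (x + b) step
      = (List.range n).map (fun (k : Nat) => x + step * (k : Int)) := by
    rw [pyRange_shift, hA0, List.map_map]; rfl
  have h2 : PySem.List.pyRange y (y + b) step
      = (List.range n).map (fun (k : Nat) => y + step * (k : Int)) := by
    rw [pyRange_shift, hA0, List.map_map]; rfl
  have h3 : PySem.List.pyRange (x + b) x (-step)
      = (List.range n).map (fun (k : Nat) => x + b - step * (k : Int)) := by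
    have := pyRange_down (x + b) b step
    rw [show x + b - b = x by ring] at this
    rw [this, hA0, List.map_map]; rfl
  have h4 : PySem.List.pyRange (y + b) y (-step)
      = (List.range n).map (fun (k : Nat) => y + b - step * (k : Int)) := by
    have := pyRange_down (y + b) b step
    rw [show y + b - b = y by ring] at this
    rw [this, hA0, List.map_map]; rfl
  rw [h1, h2, h3, h4]
  rcases Nat.eq_zero_or_pos n with hz | hpos
  · simp [hz]
  have hnI : (0 : Int) < (n : Int) := by exact_mod_cast hpos
  -- split range (4*n) into four blocks of n and compare pointwise
  rw [show 4 * n = n + (n + (n + n)) by ring, List.range_add, List.range_add, List.range_add]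
  simp only [List.map_append, List.map_map, List.append_assoc]
  congr 1
  · exact List.map_congr_left fun k hk => by
      have hk' : (k : Int) < n := by exact_mod_cast List.mem_range.mp hk
      obtain ⟨hf, hm⟩ := divmod_decode n hnI 0 k (by positivity) hk'
      rw [zero_mul, zero_add] at hf hm
      simp [hf, hm, mul_comm]
  congr 1
  · exact List.map_congr_left fun k hk => by
      have hk' : (k : Int) < n := by exact_mod_cast List.mem_range.mp hk
      obtain ⟨hf, hm⟩ := divmod_decode n hnI 1 k (by positivity) hk'
      simp only [Function.comp_apply]
      rw [show ((n + k : Nat) : Int) = 1 * (n : Int) + (k : Int) by push_cast; ring, hf, hm]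
      simp [mul_comm]
  congr 1
  · exact List.map_congr_left fun k hk => by
      have hk' : (k : Int) < n := by exact_mod_cast List.mem_range.mp hk
      obtain ⟨hf, hm⟩ := divmod_decode n hnI 2 k (by positivity) hk'
      simp only [Function.comp_apply]
      rw [show ((n + (n + k) : Nat) : Int) = 2 * (n : Int) + (k : Int) by push_cast; ring, hf, hm]
      simp [mul_comm]
  · exact List.map_congr_left fun k hk => by
      have hk' : (k : Int) < n := by exact_mod_cast List.mem_range.mp hk
      obtain ⟨hf, hm⟩ := divmod_decode n hnI 3 k (by positivity) hk'
      simp only [Function.comp_apply]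
      rw [show ((n + (n + (n + k)) : Nat) : Int) = 3 * (n : Int) + (k : Int) by push_cast; ring, hf, hm]
      simp [mul_comm]
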